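-- pv_equiv track=rewrite | github.com/abhirup780/hbbseq | hbb_pipeline/alignment.py | _build_trace_index_map
-- ===== SOURCE A (Python) =====
-- def _build_trace_index_map(aligned_query: str, query_coords: list) -> list[int]:
--     """Map each column in aligned_query to an index in the original trace (-1 = gap)."""
--     # query_coords: list of (start, end) pairs showing which query indices are aligned
--     # We reconstruct the sequential query index at each column
--     col_to_qidx: list[int] = []
--     # Build a flat list of query indices in column order
--     qidx_sequence: list[int] = []
--     for qs, qe in query_coords:
--         qidx_sequence.extend(range(qs, qe))
--
--     qi = 0
--     for col_char in aligned_query: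
--         if col_char == "-":
--             col_to_qidx.append(-1)
--         else:
--             if qi < len(qidx_sequence):
--                 col_to_qidx.append(qidx_sequence[qi])
--                 qi += 1
--             else:
--                 col_to_qidx.append(-1)
--
--     return col_to_qidx
-- ===== SOURCE B (Python) =====
-- def _build_trace_index_map(aligned_query: str, query_coords: list) -> list[int]:
--     """Two-pointer walk over the coord pairs; no flattened index list is built."""
--     coords = [(s, e) for s, e in query_coords if s < e]
--     out = []
--     i = 0
--     cur = coords[0][0] if coords else 0
--     for ch in aligned_query:
--         if ch == "-" or i >= len(coords):
--             out.append(-1)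
--         else:
--             out.append(cur)
--             cur += 1
--             if cur >= coords[i][1]:
--                 i += 1
--                 if i < len(coords):
--                     cur = coords[i][0]
--     return out
-- ===== Notes on version B (the rewrite author's own statement) =====
-- stated objective: alternative
-- what changed: B drops A's precomputed flat list of all query indices and instead walks the coordinate pairs with two pieces of state (a pointer into the non-empty pairs and a running index), emitting indices incrementally and never materialising the flattened sequence.
import Mathlib
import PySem

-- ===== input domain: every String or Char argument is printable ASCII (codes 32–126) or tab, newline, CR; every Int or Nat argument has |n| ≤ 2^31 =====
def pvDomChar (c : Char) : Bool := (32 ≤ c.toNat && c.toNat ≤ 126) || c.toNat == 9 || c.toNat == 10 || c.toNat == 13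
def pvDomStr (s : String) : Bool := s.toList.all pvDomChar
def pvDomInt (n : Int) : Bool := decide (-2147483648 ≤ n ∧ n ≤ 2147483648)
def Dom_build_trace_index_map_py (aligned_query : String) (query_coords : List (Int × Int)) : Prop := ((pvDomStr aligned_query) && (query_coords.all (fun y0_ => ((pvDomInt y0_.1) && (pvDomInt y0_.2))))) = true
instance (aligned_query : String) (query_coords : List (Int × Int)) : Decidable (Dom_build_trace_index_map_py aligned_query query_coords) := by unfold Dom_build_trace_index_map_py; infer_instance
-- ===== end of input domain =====

-- B replaces A's flattened index list by a two-pointer walk over the coord pairs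
-- (objective: alternative decomposition; avoids materialising the flat list).

-- ===== PORT A =====
def build_trace_index_map_py (aligned_query : String) (query_coords : List (Int × Int)) : List Int :=
  -- qidx_sequence built by extending with range(qs, qe) for each pair
  let qidx_sequence : List Int :=
    query_coords.foldl (fun acc p => acc ++ PySem.List.pyRange p.1 p.2 1) []
  -- loop over aligned_query with state (col_to_qidx, qi); qidx_sequence[qi] is in
  -- range whenever taken (qi < len), so the .getD 0 default is never used
  (aligned_query.toList.foldl
    (fun (st : List Int × Int) ch =>
      if ch = '-' then (st.1 ++ [(-1 : Int)], st.2)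
      else if st.2 < (qidx_sequence.length : Int) then
        (st.1 ++ [(PySem.List.pyGet? qidx_sequence st.2).getD 0], st.2 + 1)
      else (st.1 ++ [(-1 : Int)], st.2))
    ([], 0)).1

-- ===== PORT B =====
-- the walk: remaining non-empty coord pairs + current query index
def btimAltLoop : List Char → List (Int × Int) → Int → List Int
  | [], _, _ => []
  | ch :: rest, coords, cur =>
    if ch = '-' then (-1) :: btimAltLoop rest coords cur
    else
      match coords with
      | [] => (-1) :: btimAltLoop rest [] cur
      | (s, e) :: cs =>
        if cur + 1 ≥ e then
          match cs with
          | [] => cur :: btimAltLoop rest [] (cur + 1)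
          | (s2, e2) :: cs' => cur :: btimAltLoop rest ((s2, e2) :: cs') s2
        else cur :: btimAltLoop rest ((s, e) :: cs) (cur + 1)

def build_trace_index_map_py_alt (aligned_query : String) (query_coords : List (Int × Int)) : List Int :=
  let coords := query_coords.filter (fun p => p.1 < p.2)
  btimAltLoop aligned_query.toList coords (match coords with | [] => 0 | (s, _) :: _ => s)

-- ===== PRECONDITION & SPEC =====
def Spec_build_trace_index_map_py (aligned_query : String) (query_coords : List (Int × Int)) (out : List Int) : Prop := out = build_trace_index_map_py_alt aligned_query query_coords
instance (aligned_query : String) (query_coords : List (Int × Int)) (out : List Int) : Decidable (Spec_build_trace_index_map_py aligned_query query_coords out) := by unfold Spec_build_trace_index_map_py; infer_instance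

-- ===== CLAIM (what is proved, stated in full; the proofs are below) =====
def Claim_equal_build_trace_index_map_py : Prop := ∀ (aligned_query : String) (query_coords : List (Int × Int)), Dom_build_trace_index_map_py aligned_query query_coords → Spec_build_trace_index_map_py aligned_query query_coords (build_trace_index_map_py aligned_query query_coords)

-- ===== LEMMAS AND PROOFS =====

-- the flat index sequence A builds
def btimFlat (qc : List (Int × Int)) : List Int :=
  qc.flatMap (fun p => PySem.List.pyRange p.1 p.2 1)

-- reference form: consume the flat sequence column by column
def btimConsume : List Char → List Int → List Int
  | [], _ => []
  | ch :: rest, seq =>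
    if ch = '-' then (-1) :: btimConsume rest seq
    else match seq with
      | [] => (-1) :: btimConsume rest []
      | x :: xs => x :: btimConsume rest xs

-- flat sequence corresponding to B's state (remaining coords, current index)
def btimFlatCur : List (Int × Int) → Int → List Int
  | [], _ => []
  | (_, e) :: cs, cur => PySem.List.pyRange cur e 1 ++ btimFlat cs

lemma btim_pyRange_nil {a b : Int} (h : b ≤ a) : PySem.List.pyRange a b 1 = [] := by
  rw [PySem.List.pyRange_one]
  have : (b - a).toNat = 0 := by omega
  simp [this]

-- A's indexed fold equals consumption of the flat sequence
lemma btim_foldA (seq : List Int) :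
    ∀ (chars : List Char) (acc : List Int) (qi : Nat), qi ≤ seq.length →
    (chars.foldl
      (fun (st : List Int × Int) ch =>
        if ch = '-' then (st.1 ++ [(-1 : Int)], st.2)
        else if st.2 < (seq.length : Int) then
          (st.1 ++ [(PySem.List.pyGet? seq st.2).getD 0], st.2 + 1)
        else (st.1 ++ [(-1 : Int)], st.2)) (acc, (qi : Int))).1
      = acc ++ btimConsume chars (seq.drop qi) := by
  intro chars
  induction chars with
  | nil => intro acc qi _; simp [btimConsume]
  | cons ch rest ih =>
    intro acc qi hqi
    simp only [List.foldl_cons]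
    by_cases hch : ch = '-'
    · simp only [hch, if_true]
      rw [ih _ qi hqi]
      simp [btimConsume]
    · by_cases hlt : qi < seq.length
      · have hcond : ((qi : Int) < (seq.length : Int)) := by exact_mod_cast hlt
        rw [if_neg hch, if_pos hcond]
        have hget : PySem.List.pyGet? seq (qi : Int) = seq[qi]? :=
          PySem.List.pyGet?_natCast seq qi
        have hcast : ((qi : Int) + 1) = ((qi + 1 : Nat) : Int) := by push_cast; ring
        rw [hcast, ih _ (qi + 1) (by omega)]
        rw [List.drop_eq_getElem_cons hlt, btimConsume]
        simp [hch, hget, List.getElem?_eq_getElem hlt]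
      · have hcond : ¬ ((qi : Int) < (seq.length : Int)) := by
          exact_mod_cast hlt
        rw [if_neg hch, if_neg hcond]
        have hdrop : seq.drop qi = [] := List.drop_eq_nil_of_le (by omega)
        rw [ih _ qi hqi, hdrop, btimConsume]
        simp [hch]

-- dropping empty coordinate ranges does not change the flat sequence
lemma btim_flat_filter (qc : List (Int × Int)) :
    btimFlat (qc.filter (fun p => p.1 < p.2)) = btimFlat qc := by
  induction qc with
  | nil => rfl
  | cons p cs ih =>
    by_cases h : p.1 < p.2
    · simp [btimFlat, h] at ih ⊢
      exact ih
    · simp [btimFlat, h] at ih ⊢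
      rw [btim_pyRange_nil (by omega)]
      simpa using ih

-- B's two-pointer walk equals consumption of its state's flat sequence
lemma btim_walk :
    ∀ (chars : List Char) (coords : List (Int × Int)) (cur : Int),
    (∀ p ∈ coords, p.1 < p.2) →
    (∀ s e cs, coords = (s, e) :: cs → cur < e) →
    btimAltLoop chars coords cur = btimConsume chars (btimFlatCur coords cur) := by
  intro chars
  induction chars with
  | nil => intro coords cur _ _; cases coords with
    | nil => rfl
    | cons p cs => cases p; rfl
  | cons ch rest ih =>
    intro coords cur hall hcur
    by_cases hch : ch = '-'
    · cases coords with
      | nil => simp only [btimAltLoop, if_pos hch]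
               rw [ih [] cur (by simp) (by intro s e cs h; cases h)]
               simp [btimConsume, hch]
      | cons p cs =>
        cases p with | mk s e =>
        simp only [btimAltLoop, if_pos hch]
        rw [ih ((s, e) :: cs) cur hall hcur]
        have hlt : cur < e := hcur s e cs rfl
        simp [btimConsume, btimFlatCur, hch]
    · cases coords with
      | nil =>
        simp only [btimAltLoop, if_neg hch]
        rw [ih [] cur (by simp) (by intro s e cs h; cases h)]
        simp [btimConsume, btimFlatCur, hch]
      | cons p cs =>
        cases p with | mk s e =>
        have hlt : cur < e := hcur s e cs rfl
        have hhead : btimFlatCur ((s, e) :: cs) cur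
            = cur :: (PySem.List.pyRange (cur + 1) e 1 ++ btimFlat cs) := by
          simp [btimFlatCur, PySem.List.pyRange_one_cons hlt]
        by_cases hend : cur + 1 ≥ e
        · cases cs with
          | nil =>
            simp only [btimAltLoop, if_neg hch, if_pos hend]
            rw [ih [] (cur + 1) (by simp) (by intro s' e' cs' h; cases h)]
            rw [hhead, btimConsume]
            simp [btimFlatCur, btimFlat, hch, btim_pyRange_nil (by omega)]
          | cons q cs' =>
            cases q with | mk s2 e2 =>
            simp only [btimAltLoop, if_neg hch, if_pos hend]
            have h2 : (s2, e2).1 < (s2, e2).2 := hall _ (by simp)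
            rw [ih ((s2, e2) :: cs') s2
                  (by intro p hp; exact hall p (List.mem_cons_of_mem _ hp))
                  (by intro s' e' cs'' h; injection h with h1 h2'; subst h2';
                      have := (Prod.mk.injEq _ _ _ _).mp h1
                      omega)]
            rw [hhead, btimConsume]
            simp only [hch]
            have : btimFlatCur ((s2, e2) :: cs') s2
                = PySem.List.pyRange (cur + 1) e 1 ++ btimFlat ((s2, e2) :: cs') := by
              simp [btimFlatCur, btimFlat, btim_pyRange_nil (by omega : e ≤ cur + 1)]
            rw [this]
            simp
        · simp only [btimAltLoop, if_neg hch, if_neg hend]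
          rw [ih ((s, e) :: cs) (cur + 1) hall
                (by intro s' e' cs' h; injection h with h1 _;
                    have := (Prod.mk.injEq _ _ _ _).mp h1; omega)]
          rw [hhead, btimConsume]
          simp [btimFlatCur, hch]

-- ===== VERDICT (by name: the statement is the Claim_ definition above) =====
theorem build_trace_index_map_py_spec : Claim_equal_build_trace_index_map_py := by
  unfold Claim_equal_build_trace_index_map_py
  intro aq qc _
  unfold Spec_build_trace_index_map_py build_trace_index_map_py build_trace_index_map_py_alt
  simp only []
  rw [PySem.List.foldl_append_eq_flatMap (fun p : Int × Int => PySem.List.pyRange p.1 p.2 1) qc []]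
  simp only [List.nil_append]
  have hA := btim_foldA (List.flatMap (fun p : Int × Int => PySem.List.pyRange p.1 p.2 1) qc)
      aq.toList [] 0 (by omega)
  simp only [Nat.cast_zero, List.nil_append, List.drop_zero] at hA
  rw [hA]
  rw [show List.flatMap (fun p : Int × Int => PySem.List.pyRange p.1 p.2 1) qc = btimFlat qc from rfl]
  have hall : ∀ p ∈ qc.filter (fun p : Int × Int => p.1 < p.2), p.1 < p.2 := by
    intro p hp
    have := List.of_mem_filter hp
    exact_mod_cast of_decide_eq_true this
  cases hf : qc.filter (fun p : Int × Int => p.1 < p.2) with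
  | nil =>
    rw [btim_walk aq.toList [] 0 (by simp) (by intro s e cs h; cases h)]
    have : btimFlat qc = [] := by rw [← btim_flat_filter qc, hf]; rfl
    rw [this]; rfl
  | cons p cs =>
    cases p with | mk s e =>
    rw [hf] at hall
    have hse : s < e := hall (s, e) (by simp)
    rw [btim_walk aq.toList ((s, e) :: cs) s hall
          (by intro s' e' cs' h; injection h with h1 _;
              have := (Prod.mk.injEq _ _ _ _).mp h1; omega)]
    have : btimFlat qc = btimFlatCur ((s, e) :: cs) s := by
      rw [← btim_flat_filter qc, hf]
      simp [btimFlat, btimFlatCur]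
    rw [this]
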